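-- pv_equiv track=rewrite | github.com/Apfirebolt/Data-Structures-and-Algorithms-in-Python | Arrays/escape_thief.py | numberClimbs
-- ===== SOURCE A (Python) =====
-- def numberClimbs(x, y, n, heights):
--   cnt = 0
--   i = 0
--   while i < n:
--     climb = 0
--     current_height = heights[i]
--     while True:
--       climb += x
--       cnt += 1
--
--       if climb >= current_height:
--         break
--       else:
--         climb -= y
--     i += 1
--
--   return cnt
-- ===== SOURCE B (Python) =====
-- def numberClimbs(x, y, n, heights):
--     total = 0
--     for h in heights[:max(n, 0)]:
--         total += 1 if h <= x else -(-(h - y) // (x - y))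
--     return total
-- ===== Notes on version B (the rewrite author's own statement) =====
-- stated objective: simpler
-- what changed: Replace the inner step-by-step climbing simulation with a closed-form ceiling division per height (1 step if h <= x, else ceil((h-y)/(x-y))), summed in one pass over the first n heights.
-- outside the precondition, e.g. on numberClimbs(2, 1, 3, [5, 1]): A raises IndexError, B returns 5; on numberClimbs(1, 2, 1, [5]): A does not finish within the time limit, B returns -3
import Mathlib
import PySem

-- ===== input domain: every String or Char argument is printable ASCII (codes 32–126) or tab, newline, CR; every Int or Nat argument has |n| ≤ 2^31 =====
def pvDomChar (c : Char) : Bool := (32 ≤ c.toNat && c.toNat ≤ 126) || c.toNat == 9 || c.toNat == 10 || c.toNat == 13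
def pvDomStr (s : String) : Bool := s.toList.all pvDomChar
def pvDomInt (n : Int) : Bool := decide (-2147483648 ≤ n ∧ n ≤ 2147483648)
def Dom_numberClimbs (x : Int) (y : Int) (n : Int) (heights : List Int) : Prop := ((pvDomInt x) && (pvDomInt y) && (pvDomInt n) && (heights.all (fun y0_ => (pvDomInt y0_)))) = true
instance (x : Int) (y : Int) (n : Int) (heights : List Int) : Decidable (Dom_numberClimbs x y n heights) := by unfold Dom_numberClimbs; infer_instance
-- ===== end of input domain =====

-- B replaces A's step-by-step climbing simulation of each height with a closed-form
-- ceiling division per height, summed in one pass over the first n heights.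

-- ===== PORT A =====
-- inner `while True` loop of A: returns how many times `cnt += 1` ran for one height.
-- The fuel argument only makes the recursion total; the caller passes enough fuel for
-- every input on which the Python loop terminates.
def numberClimbsInner (x : Int) (y : Int) (h : Int) (climb : Int) : Nat → Int
  | 0 => 0
  | Nat.succ fuel =>
      let c := climb + x
      if c ≥ h then 1 else 1 + numberClimbsInner x y h (c - y) fuel

-- outer `while i < n` loop of A
def numberClimbsGo (x : Int) (y : Int) (n : Int) (heights : List Int) (cnt : Int) (i : Int) : Int :=
  if hlt : i < n then
    let ch := PySem.List.pyGetD heights i 0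
    numberClimbsGo x y n heights (cnt + numberClimbsInner x y ch 0 ((ch - x).toNat + 1)) (i + 1)
  else cnt
termination_by (n - i).toNat
decreasing_by omega

def numberClimbs (x : Int) (y : Int) (n : Int) (heights : List Int) : Int :=
  numberClimbsGo x y n heights 0 0

-- ===== PORT B =====
-- '1 if h <= x else -(-(h - y) // (x - y))'
def climbSteps (x : Int) (y : Int) (h : Int) : Int :=
  if h ≤ x then 1 else -(PySem.Int.floordiv (-(h - y)) (x - y))

def numberClimbs_alt (x : Int) (y : Int) (n : Int) (heights : List Int) : Int :=
  (PySem.List.slice heights none (some (max n 0))).foldl (fun total h => total + climbSteps x y h) 0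

-- ===== PRECONDITION & SPEC =====
-- Pre_ excludes exactly the inputs on which the Python A does not return: n beyond the
-- list length (IndexError at heights[i]) and heights among the first n that exceed x
-- while y ≥ x (the inner loop never reaches the height and diverges).
def Pre_numberClimbs (x : Int) (y : Int) (n : Int) (heights : List Int) : Prop :=
  n ≤ heights.length ∧ ∀ h ∈ heights.take n.toNat, h ≤ x ∨ y < x

instance (x : Int) (y : Int) (n : Int) (heights : List Int) : Decidable (Pre_numberClimbs x y n heights) := by
  unfold Pre_numberClimbs; infer_instance

def pvWitness_numberClimbs : Int × Int × Int × List Int := (2, 1, 2, [5, 1])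

def Spec_numberClimbs (x : Int) (y : Int) (n : Int) (heights : List Int) (out : Int) : Prop := out = numberClimbs_alt x y n heights
instance (x : Int) (y : Int) (n : Int) (heights : List Int) (out : Int) : Decidable (Spec_numberClimbs x y n heights out) := by unfold Spec_numberClimbs; infer_instance

-- ===== CLAIM (what is proved, stated in full; the proofs are below) =====
def Claim_equal_numberClimbs : Prop := ∀ (x : Int) (y : Int) (n : Int) (heights : List Int), Dom_numberClimbs x y n heights → Pre_numberClimbs x y n heights → Spec_numberClimbs x y n heights (numberClimbs x y n heights)

-- ===== LEMMAS AND PROOFS =====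

-- closed form of A's inner loop, for y < x and enough fuel
lemma inner_closed (x y h : Int) (hyx : y < x) :
    ∀ (fuel : Nat) (climb : Int), (h - climb - x).toNat < fuel →
      numberClimbsInner x y h climb fuel
        = max 1 (-(PySem.Int.floordiv (-(h - climb - y)) (x - y))) := by
  intro fuel
  induction fuel with
  | zero => intro climb hf; omega
  | succ fuel ih =>
    intro climb hf
    have hb : (0:Int) < x - y := by omega
    simp only [numberClimbsInner]
    by_cases hc : climb + x ≥ h
    · simp only [hc, if_pos]
      -- ceiling ≤ 1, so max 1 … = 1
      have h1 : -(PySem.Int.floordiv (-(h - climb - y)) (x - y)) ≤ 1 := by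
        have := (PySem.Int.le_floordiv_iff_mul_le (a := -(h - climb - y)) (b := x - y)
          (q := -1) hb)
        omega
      omega
  -- recursive case
    · simp only [hc, if_neg, not_false_iff]
      have hrec := ih (climb + x - y) (by omega)
      rw [hrec]
      have hgt : climb + x < h := by omega
      -- a' := h - climb - x ≥ 1
      have key : PySem.Int.floordiv (-(h - (climb + x - y) - y)) (x - y)
          = PySem.Int.floordiv (-(h - climb - y)) (x - y) + 1 := by
        rw [PySem.Int.floordiv_eq_ediv_of_pos hb, PySem.Int.floordiv_eq_ediv_of_pos hb]
        have : -(h - (climb + x - y) - y) = -(h - climb - y) + 1 * (x - y) := by ring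
        rw [this, Int.add_mul_ediv_right _ _ (by omega : x - y ≠ 0)]
      have hge1 : (1:Int) ≤ -(PySem.Int.floordiv (-(h - (climb + x - y) - y)) (x - y)) := by
        have := (PySem.Int.floordiv_lt_iff_lt_mul (a := -(h - (climb + x - y) - y))
          (b := x - y) (q := 0) hb)
        omega
      omega

-- per-height agreement: A's simulated climb count equals B's closed form
lemma inner_eq_climbSteps (x y h : Int) (hcond : h ≤ x ∨ y < x) :
    numberClimbsInner x y h 0 ((h - x).toNat + 1) = climbSteps x y h := by
  by_cases hx : h ≤ x
  · have : (h - x).toNat = 0 := by omega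
    rw [this]
    simp [numberClimbsInner, climbSteps, hx]
  · have hyx : y < x := by tauto
    have hb : (0:Int) < x - y := by omega
    rw [inner_closed x y h hyx _ 0 (by omega)]
    have hge1 : (1:Int) ≤ -(PySem.Int.floordiv (-(h - 0 - y)) (x - y)) := by
      have := (PySem.Int.floordiv_lt_iff_lt_mul (a := -(h - 0 - y)) (b := x - y) (q := 0) hb)
      omega
    simp only [climbSteps, if_neg hx]
    have : h - 0 - y = h - y := by ring
    rw [this] at hge1 ⊢
    omega

-- A's outer loop equals a fold of climbSteps over the not-yet-visited prefix elements
lemma go_closed (x y n : Int) (heights : List Int)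
    (hn : n ≤ heights.length)
    (hall : ∀ h ∈ heights.take n.toNat, h ≤ x ∨ y < x) :
    ∀ (k : Nat) (i cnt : Int), 0 ≤ i → (n - i).toNat = k →
      numberClimbsGo x y n heights cnt i
        = cnt + ((heights.take n.toNat).drop i.toNat).foldl (fun t h => t + climbSteps x y h) 0 := by
  intro k
  induction k with
  | zero =>
    intro i cnt hi hk
    have hni : ¬ i < n := by omega
    rw [numberClimbsGo]
    simp only [hni, dif_neg, not_false_iff]
    have hlen : (heights.take n.toNat).length ≤ i.toNat := by
      simp [List.length_take]; omega
    rw [List.drop_eq_nil_of_le hlen]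
    simp
  | succ k ih =>
    intro i cnt hi hk
    have hin : i < n := by omega
    rw [numberClimbsGo]
    simp only [hin, dif_pos]
    have hidx : i.toNat < (heights.take n.toNat).length := by
      simp [List.length_take]; omega
    have hidx' : i.toNat < heights.length := by
      simp [List.length_take] at hidx; omega
    have hget : PySem.List.pyGetD heights i 0 = heights[i.toNat] := by
      exact PySem.List.pyGetD_eq_getElem heights 0 hi (by omega)
    have hdrop : (heights.take n.toNat).drop i.toNat
        = (heights.take n.toNat)[i.toNat] :: (heights.take n.toNat).drop (i.toNat + 1) :=
      List.drop_eq_getElem_cons hidx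
    have hel : (heights.take n.toNat)[i.toNat] = heights[i.toNat] := by
      exact List.getElem_take
    have hmem : heights[i.toNat] ∈ heights.take n.toNat := by
      rw [← hel]; exact List.getElem_mem hidx
    have hstep := inner_eq_climbSteps x y (heights[i.toNat]) (hall _ hmem)
    rw [ih (i + 1) _ (by omega) (by omega)]
    have hi1 : (i + 1).toNat = i.toNat + 1 := by omega
    rw [hi1, hdrop, hel]
    simp only [List.foldl_cons]
    rw [hget, hstep]
    rw [PySem.List.foldl_add, PySem.List.foldl_add]
    ring

-- B's port unfolded to the same fold over the taken prefix
lemma alt_closed (x y n : Int) (heights : List Int) :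
    numberClimbs_alt x y n heights
      = (heights.take n.toNat).foldl (fun t h => t + climbSteps x y h) 0 := by
  unfold numberClimbs_alt
  rw [PySem.List.slice_to heights (le_max_right n 0)]
  have : (max n 0).toNat = n.toNat := by omega
  rw [this]

-- ===== VERDICT (by name: the statement is the Claim_ definition above) =====
theorem numberClimbs_spec : Claim_equal_numberClimbs := by
  intro x y n heights _hdom hpre
  obtain ⟨hn, hall⟩ := hpre
  unfold Spec_numberClimbs numberClimbs
  rw [go_closed x y n heights hn hall (n - 0).toNat 0 0 (by omega) rfl, alt_closed]
  simp
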